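-- pv_equiv track=rewrite | github.com/pypi-data/pypi-mirror-286 | packages/quantplay/quantplay-1.6.20-py3-none-any.whl/quantplay/reporting/strategy_report.py | max_drawdown_days
-- ===== SOURCE A (Python) =====
-- def max_drawdown_days(vec):
--     start_index = 0
--     running_max_balance = 0
--     max_drawdown_days = 0
--     for i in range(0, len(vec)):
--         balance = vec[i]
--
--         if balance > running_max_balance:
--             running_max_balance = balance
--             start_index = i
--
--         max_drawdown_days = max(max_drawdown_days, i - start_index)
--
--     return max_drawdown_days
-- ===== SOURCE B (Python) =====
-- def max_drawdown_days(vec):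
--     # Two passes: collect the indices of record highs, then measure the gaps
--     # between consecutive record highs (plus the leading and trailing segments).
--     n = len(vec)
--     running = 0
--     highs = []
--     for i, v in enumerate(vec):
--         if v > running:
--             running = v
--             highs.append(i)
--     if not highs:
--         return n - 1 if n > 0 else 0
--     best = highs[0] - 1
--     prev = highs[0]
--     for h in highs[1:]:
--         best = max(best, h - prev - 1)
--         prev = h
--     return max(best, n - 1 - prev)
-- ===== Notes on version B (the rewrite author's own statement) =====
-- stated objective: alternative
-- what changed: A fuses everything into one loop that tracks a start index and a running maximum of the drawdown length; B makes two passes: first it collects the list of record-high indices, then it returns the maximum gap between consecutive record highs (plus the leading and trailing segments).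
import Mathlib
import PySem

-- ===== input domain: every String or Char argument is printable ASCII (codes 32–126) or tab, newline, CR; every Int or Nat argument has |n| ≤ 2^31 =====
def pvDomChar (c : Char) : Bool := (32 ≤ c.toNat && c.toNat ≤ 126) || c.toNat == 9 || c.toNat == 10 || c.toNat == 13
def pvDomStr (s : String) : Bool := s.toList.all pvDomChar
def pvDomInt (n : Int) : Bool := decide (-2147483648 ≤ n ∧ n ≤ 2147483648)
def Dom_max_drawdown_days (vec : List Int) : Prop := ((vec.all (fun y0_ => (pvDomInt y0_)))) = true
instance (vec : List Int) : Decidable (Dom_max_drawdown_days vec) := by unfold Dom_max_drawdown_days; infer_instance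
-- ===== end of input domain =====

-- B replaces A's fused single loop (counter + running start index) by two passes:
-- collect the record-high indices, then take the maximum gap between consecutive
-- record highs (plus leading/trailing segments); objective: alternative decomposition.

-- ===== PORT A =====
-- loop body of A's 'for i in range(0, len(vec))', state (start_index, running_max_balance, max_drawdown_days)
def pyABody (vec : List Int) (s : Int × Int × Int) (i : Int) : Int × Int × Int :=
  let balance := PySem.List.pyGetD vec i 0   -- vec[i]; i is always in range here
  let s := if balance > s.2.1 then (i, balance, s.2.2) else s
  (s.1, s.2.1, max s.2.2 (i - s.1))

def max_drawdown_days (vec : List Int) : Int :=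
  ((PySem.List.pyRange 0 vec.length 1).foldl (pyABody vec) (0, 0, 0)).2.2

-- ===== PORT B =====
-- first pass: collect record-high indices (state = (running, highs))
def pyBHigh (s : Int × List Int) (iv : Int × Int) : Int × List Int :=
  if iv.2 > s.1 then (iv.2, s.2 ++ [iv.1]) else s

-- second pass: maximum gap between consecutive record highs (state = (best, prev))
def pyBGap (s : Int × Int) (h : Int) : Int × Int :=
  (max s.1 (h - s.2 - 1), h)

def max_drawdown_days_alt (vec : List Int) : Int :=
  let n : Int := vec.length
  let highs := ((PySem.List.enumerate vec).foldl pyBHigh (0, [])).2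
  match highs with
  | [] => if n > 0 then n - 1 else 0
  | h0 :: rest =>
    let bp := rest.foldl pyBGap (h0 - 1, h0)
    max bp.1 (n - 1 - bp.2)

-- ===== PRECONDITION & SPEC =====
def Spec_max_drawdown_days (vec : List Int) (out : Int) : Prop := out = max_drawdown_days_alt vec
instance (vec : List Int) (out : Int) : Decidable (Spec_max_drawdown_days vec out) := by unfold Spec_max_drawdown_days; infer_instance

-- ===== CLAIM (what is proved, stated in full; the proofs are below) =====
def Claim_equal_max_drawdown_days : Prop := ∀ (vec : List Int), Dom_max_drawdown_days vec → Spec_max_drawdown_days vec (max_drawdown_days vec)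

-- ===== LEMMAS AND PROOFS =====

-- record-high indices of t, scanning from absolute index i with running max rm
def pvRecords : List Int → Int → Int → List Int
  | [], _, _ => []
  | v :: t, i, rm => if v > rm then i :: pvRecords t (i + 1) v else pvRecords t (i + 1) rm

-- gap-maximum: max of m, the gaps between consecutive elements of s::H, and last - (final element)
def pvG : List Int → Int → Int → Int → Int
  | [], s, m, last => max m (last - s)
  | h :: hs, s, m, last => pvG hs h (max m (h - s - 1)) last

theorem pyABody_eq (vec : List Int) (s : Int × Int × Int) (i : Int) :
    pyABody vec s i =
      if PySem.List.pyGetD vec i 0 > s.2.1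
      then (i, PySem.List.pyGetD vec i 0, max s.2.2 (i - i))
      else (s.1, s.2.1, max s.2.2 (i - s.1)) := by
  simp only [pyABody]
  split_ifs with h <;> simp

theorem pvRecords_ge (t : List Int) (i rm h : Int) (hm : h ∈ pvRecords t i rm) : i ≤ h := by
  induction t generalizing i rm with
  | nil => simp [pvRecords] at hm
  | cons v t ih =>
    simp only [pvRecords] at hm
    split at hm
    · rcases List.mem_cons.1 hm with h1 | h1
      · omega
      · have := ih _ _ h1; omega
    · have := ih _ _ hm; omega

theorem pvRecords_lt (t : List Int) (i rm h : Int) (hm : h ∈ pvRecords t i rm) : h < i + t.length := by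
  induction t generalizing i rm with
  | nil => simp [pvRecords] at hm
  | cons v t ih =>
    simp only [pvRecords] at hm
    split at hm
    · rcases List.mem_cons.1 hm with h1 | h1
      · simp; omega
      · have := ih _ _ h1; simp; omega
    · have := ih _ _ hm; simp; omega

theorem pvG_absorb (H : List Int) (s m x last : Int)
    (hx : match H with | [] => x ≤ last - s | h :: _ => x ≤ h - s - 1) :
    pvG H s (max m x) last = pvG H s m last := by
  cases H with
  | nil => simp only [pvG]; simp at hx; omega
  | cons h hs =>
    simp only [pvG] at hx ⊢
    congr 1
    omega

theorem pvG_max_left (H : List Int) (s m a last : Int) :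
    pvG H s (max a m) last = max a (pvG H s m last) := by
  induction H generalizing s m with
  | nil => simp only [pvG]; omega
  | cons h hs ih =>
    simp only [pvG]
    rw [show max (max a m) (h - s - 1) = max a (max m (h - s - 1)) by omega, ih]

def pvLast : List Int → Int → Int
  | [], d => d
  | h :: hs, _ => pvLast hs h

theorem pvLast_mem (hs : List Int) (h : Int) : pvLast hs h ∈ h :: hs := by
  induction hs generalizing h with
  | nil => simp [pvLast]
  | cons h2 hs ih => exact List.mem_cons_of_mem _ (ih h2)

theorem pvG_ge (H : List Int) (s m last : Int) : last - pvLast H s ≤ pvG H s m last := by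
  induction H generalizing s m with
  | nil => simp only [pvG, pvLast]; omega
  | cons h hs ih => simpa only [pvG, pvLast] using ih h (max m (h - s - 1))

-- A's fold equals the gap-maximum of the record list (invariant-carrying form)
theorem pvMainA (t pre : List Int) (start rm mdd : Int)
    (h0 : 0 ≤ start) (h1 : start ≤ pre.length) (h2 : (pre.length : Int) - 1 - start ≤ mdd)
    (h3 : 0 ≤ mdd) :
    ((PySem.List.pyRange pre.length (pre.length + t.length) 1).foldl
        (pyABody (pre ++ t)) (start, rm, mdd)).2.2
    = pvG (pvRecords t pre.length rm) start mdd ((pre.length : Int) + t.length - 1) := by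
  induction t generalizing pre start rm mdd with
  | nil =>
    simp only [List.length_nil, Nat.cast_zero, add_zero,
      PySem.List.pyRange_one_eq_nil (le_refl _), List.foldl_nil, pvRecords, pvG]
    omega
  | cons v t ih =>
    have hb : ((pre.length : Int) < (pre.length : Int) + (v :: t).length) := by
      simp only [List.length_cons]; push_cast; omega
    rw [PySem.List.pyRange_one_cons hb, List.foldl_cons, pyABody_eq]
    have hget : PySem.List.pyGetD (pre ++ v :: t) (pre.length : Int) 0 = v := by
      rw [PySem.List.pyGetD_natCast]
      simp [List.getD]
    rw [hget]
    have hlen : ((pre ++ [v]).length : Int) = (pre.length : Int) + 1 := by simp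
    have happ : (pre ++ [v]) ++ t = pre ++ v :: t := by simp
    have harith : ((pre.length : Int) + 1) + (t.length : Int) = (pre.length : Int) + ((v :: t).length : Int) := by
      simp only [List.length_cons]; push_cast; omega
    simp only [pvRecords]
    by_cases hv : v > rm
    · rw [if_pos hv, if_pos hv]
      have := ih (pre ++ [v]) (pre.length : Int) v (max mdd ((pre.length : Int) - (pre.length : Int)))
        (by omega) (by simp) (by simp only [List.length_append, List.length_cons, List.length_nil]; push_cast; omega) (by omega)
      rw [happ, hlen, harith] at this
      rw [this]
      simp only [pvG]
      congr 1
      omega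
    · rw [if_neg hv, if_neg hv]
      have := ih (pre ++ [v]) start rm (max mdd ((pre.length : Int) - start))
        h0 (by simp only [List.length_append, List.length_cons, List.length_nil]; push_cast; omega)
        (by simp only [List.length_append, List.length_cons, List.length_nil]; push_cast; omega) (by omega)
      rw [happ, hlen, harith] at this
      rw [this, pvG_absorb]
      cases hR : pvRecords t ((pre.length : Int) + 1) rm with
      | nil => simp
      | cons r rs =>
        have hr : r ∈ pvRecords t ((pre.length : Int) + 1) rm := by
          rw [hR]; exact List.mem_cons_self
        have := pvRecords_ge t _ rm r hr
        simp only []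
        omega

-- B's first pass builds exactly pvRecords
theorem pvAltRecords (t : List Int) (i rm : Int) (acc : List Int) :
    ((PySem.List.enumerate t i).foldl pyBHigh (rm, acc)).2 = acc ++ pvRecords t i rm := by
  induction t generalizing i rm acc with
  | nil => simp [PySem.List.enumerate_nil, pvRecords]
  | cons v t ih =>
    rw [PySem.List.enumerate_cons, List.foldl_cons]
    simp only [pvRecords]
    rw [show pyBHigh (rm, acc) (i, v) = if v > rm then (v, acc ++ [i]) else (rm, acc) from by
      simp [pyBHigh]]
    by_cases hv : v > rm
    · rw [if_pos hv, if_pos hv, ih]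
      simp
    · rw [if_neg hv, if_neg hv, ih]

-- B's second pass computes pvG
theorem pvAltGaps (hs : List Int) (h m last : Int) :
    pvG hs h m last
    = max (hs.foldl pyBGap (m, h)).1 (last - (hs.foldl pyBGap (m, h)).2) := by
  induction hs generalizing h m with
  | nil => simp [pvG]
  | cons h2 hs ih =>
    rw [List.foldl_cons, show pyBGap (m, h) h2 = (max m (h2 - h - 1), h2) from rfl]
    simp only [pvG]
    rw [ih]

-- ===== VERDICT (by name: the statement is the Claim_ definition above) =====
theorem max_drawdown_days_spec : Claim_equal_max_drawdown_days := by
  intro vec _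
  show max_drawdown_days vec = max_drawdown_days_alt vec
  unfold max_drawdown_days max_drawdown_days_alt
  have hA := pvMainA vec [] 0 0 0 (le_refl 0) (by simp) (by simp) (le_refl 0)
  simp only [List.length_nil, Nat.cast_zero, List.nil_append, zero_add] at hA
  rw [hA]
  have hB := pvAltRecords vec 0 0 []
  simp only [List.nil_append] at hB
  rw [hB]
  cases hR : pvRecords vec 0 0 with
  | nil =>
    simp only [pvG]
    by_cases hn : ((vec.length : Int) > 0)
    · rw [if_pos hn]; omega
    · rw [if_neg hn]; omega
  | cons h0 rest =>
    simp only [pvG, sub_zero]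
    rw [pvG_max_left, pvAltGaps]
    have hlast : (pvLast rest h0) ∈ pvRecords vec 0 0 := by
      rw [hR]; exact pvLast_mem rest h0
    have hlt := pvRecords_lt vec 0 0 _ hlast
    have hge := pvG_ge rest h0 (h0 - 1) ((vec.length : Int) - 1)
    rw [pvAltGaps] at hge
    simp only [zero_add] at hlt
    omega
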